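-- pv_equiv track=rewrite | github.com/smedhe/AI_BUZZ_V2 | core/app.py | remove_references_section
-- ===== SOURCE A (Python) =====
-- def remove_references_section(content: str) -> str:
--     """Remove the References section from markdown content."""
--     if not content:
--         return content
--
--     lines = content.split('\n')
--     filtered_lines = []
--     in_references_section = False
--
--     for line in lines:
--         # Check if this line starts a References section
--         if line.strip().startswith('## References') or line.strip().startswith('### References'):
--             in_references_section = True
--             continue
--
--         # Check if we're exiting the references section (next heading or end)
--         if in_references_section and line.strip().startswith('#'):
--             in_references_section = False
--
--         # Skip lines in the references section
--         if in_references_section: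
--             continue
--
--         # Keep all other lines
--         filtered_lines.append(line)
--
--     return '\n'.join(filtered_lines)
-- ===== SOURCE B (Python) =====
-- def remove_references_section(content: str) -> str:
--     """Remove the References section from markdown content."""
--     blocks = []
--     current = []
--     for line in content.split('\n'):
--         if line.strip().startswith('#'):
--             blocks.append(current)
--             current = [line]
--         else:
--             current.append(line)
--     blocks.append(current)
--     kept = [b for b in blocks
--             if not (b and (b[0].strip().startswith('## References')
--                            or b[0].strip().startswith('### References')))]
--     return '\n'.join(line for b in kept for line in b)
-- ===== Notes on version B (the rewrite author's own statement) =====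
-- stated objective: alternative
-- what changed: Replaces the running in_references_section boolean scan by a section decomposition: group lines into heading-delimited blocks, filter out blocks whose heading starts a References section, and flatten back.
import Mathlib
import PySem

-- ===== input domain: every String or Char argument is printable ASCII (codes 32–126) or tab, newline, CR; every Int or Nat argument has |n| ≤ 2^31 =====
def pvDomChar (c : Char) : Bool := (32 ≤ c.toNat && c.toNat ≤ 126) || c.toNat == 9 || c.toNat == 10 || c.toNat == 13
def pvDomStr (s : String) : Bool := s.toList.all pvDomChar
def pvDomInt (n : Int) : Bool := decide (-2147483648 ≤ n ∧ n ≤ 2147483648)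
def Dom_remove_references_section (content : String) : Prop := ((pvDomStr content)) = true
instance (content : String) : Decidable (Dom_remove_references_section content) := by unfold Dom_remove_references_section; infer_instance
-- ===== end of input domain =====

-- B replaces A's running in_references_section boolean by a group-into-heading-blocks-then-filter decomposition; same result, same cost (objective: alternative).

-- shared predicates (the same strip()/startswith tests both Pythons write inline)
def pvIsRefHead (line : String) : Bool :=
  PySem.Str.startswith (PySem.Str.strip line) "## References" ||
  PySem.Str.startswith (PySem.Str.strip line) "### References"

def pvIsHead (line : String) : Bool :=
  PySem.Str.startswith (PySem.Str.strip line) "#"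

-- content.split('\n') ('\n' is nonempty, so Python never raises here)
def pvSplitLines (content : String) : List String :=
  (PySem.Chars.splitOn content.toList "\n".toList).map String.ofList

-- ===== PORT A =====
-- the body of A's for-loop over (filtered_lines, in_references_section)
def stepA (st : List String × Bool) (line : String) : List String × Bool :=
  if pvIsRefHead line then (st.1, true)
  else
    let inRef := if st.2 && pvIsHead line then false else st.2
    if inRef then (st.1, inRef)
    else (st.1 ++ [line], inRef)

def remove_references_section (content : String) : String :=
  if content = "" then content
  else
    let st := (pvSplitLines content).foldl stepA ([], false)
    PySem.Str.join "\n" st.1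

-- ===== PORT B =====
-- keep b  =  not (b and (b[0].strip() starts '## References' or '### References'))
def pvKeep (b : List String) : Bool :=
  match b with
  | [] => true
  | h :: _ => !pvIsRefHead h

-- the body of B's for-loop over (blocks, current)
def stepB (st : List (List String) × List String) (line : String) : List (List String) × List String :=
  if pvIsHead line then (st.1 ++ [st.2], [line])
  else (st.1, st.2 ++ [line])

def remove_references_section_alt (content : String) : String :=
  let st := (pvSplitLines content).foldl stepB ([], [])
  let blocks := st.1 ++ [st.2]
  let kept := blocks.filter pvKeep
  PySem.Str.join "\n" kept.flatten

-- ===== PRECONDITION & SPEC =====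
def Spec_remove_references_section (content : String) (out : String) : Prop := out = remove_references_section_alt content
instance (content : String) (out : String) : Decidable (Spec_remove_references_section content out) := by unfold Spec_remove_references_section; infer_instance

-- ===== CLAIM (what is proved, stated in full; the proofs are below) =====
def Claim_equal_remove_references_section : Prop := ∀ (content : String), Dom_remove_references_section content → Spec_remove_references_section content (remove_references_section content)

-- ===== LEMMAS AND PROOFS =====

-- A's loop as a pure recursion on the lines with the boolean state
def procA : List String → Bool → List String
  | [], _ => []
  | l :: ls, r =>
    if pvIsRefHead l then procA ls true
    else if r && !pvIsHead l then procA ls true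
    else l :: procA ls false

-- B's grouping loop as a pure recursion
def groupGo : List String → List String → List (List String)
  | [], cur => [cur]
  | l :: ls, cur => if pvIsHead l then cur :: groupGo ls [l] else groupGo ls (cur ++ [l])

def flatKept (blocks : List (List String)) : List String := (blocks.filter pvKeep).flatten

lemma refHead_isHead (l : String) (h : pvIsRefHead l = true) : pvIsHead l = true := by
  unfold pvIsRefHead at h
  unfold pvIsHead
  rcases Bool.or_eq_true_iff.mp h with h' | h' <;>
  · simp only [PySem.Str.startswith_eq, PySem.Chars.startswith_iff] at h' ⊢
    exact List.IsPrefix.trans (by decide) h'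

lemma foldA (ls : List String) : ∀ (acc : List String) (r : Bool),
    (ls.foldl stepA (acc, r)).1 = acc ++ procA ls r := by
  induction ls with
  | nil => intro acc r; simp [procA]
  | cons l ls ih =>
    intro acc r
    rw [List.foldl_cons]
    by_cases h : pvIsRefHead l = true
    · rw [show stepA (acc, r) l = (acc, true) by simp [stepA, h], ih, procA, if_pos h]
    · rcases Bool.eq_false_or_eq_true r with hr | hr <;> subst hr
      · rcases Bool.eq_false_or_eq_true (pvIsHead l) with hh | hh
        · rw [show stepA (acc, true) l = (acc ++ [l], false) by simp [stepA, h, hh], ih]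
          simp [procA, h, hh]
        · rw [show stepA (acc, true) l = (acc, true) by simp [stepA, h, hh], ih]
          simp [procA, h, hh]
      · rw [show stepA (acc, false) l = (acc ++ [l], false) by simp [stepA, h], ih]
        simp [procA, h]

lemma foldB (ls : List String) : ∀ (blocks : List (List String)) (cur : List String),
    (ls.foldl stepB (blocks, cur)).1 ++ [(ls.foldl stepB (blocks, cur)).2]
      = blocks ++ groupGo ls cur := by
  induction ls with
  | nil => intro blocks cur; simp [groupGo]
  | cons l ls ih =>
    intro blocks cur
    rw [List.foldl_cons]
    by_cases h : pvIsHead l = true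
    · rw [show stepB (blocks, cur) l = (blocks ++ [cur], [l]) by simp [stepB, h], ih]
      simp [groupGo, h]
    · rw [show stepB (blocks, cur) l = (blocks, cur ++ [l]) by simp [stepB, h], ih]
      simp [groupGo, h]

lemma keep_append (cur : List String) (l : String) (h : pvIsRefHead l = false) :
    pvKeep (cur ++ [l]) = pvKeep cur := by
  cases cur with
  | nil => simp [pvKeep, h]
  | cons c cs => simp [pvKeep]

lemma main_lemma (ls : List String) : ∀ (cur : List String),
    flatKept (groupGo ls cur) = (if pvKeep cur then cur else []) ++ procA ls (!pvKeep cur) := by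
  induction ls with
  | nil =>
    intro cur
    by_cases hk : pvKeep cur = true <;> simp [groupGo, flatKept, procA, List.filter, hk]
  | cons l ls ih =>
    intro cur
    by_cases hh : pvIsHead l = true
    · rw [show groupGo (l :: ls) cur = cur :: groupGo ls [l] by simp [groupGo, hh]]
      have hsplit : flatKept (cur :: groupGo ls [l])
          = (if pvKeep cur then cur else []) ++ flatKept (groupGo ls [l]) := by
        unfold flatKept; rw [List.filter_cons]; split_ifs <;> simp_all
      rw [hsplit, ih [l]]
      by_cases hr : pvIsRefHead l = true
      · rw [show pvKeep [l] = false by simp [pvKeep, hr]]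
        simp [procA, hr]
      · rw [show pvKeep [l] = true by simp [pvKeep]; simp_all]
        simp [procA, hr, hh]
    · have hr : pvIsRefHead l = false := by
        cases hx : pvIsRefHead l
        · rfl
        · exact absurd (refHead_isHead l hx) hh
      rw [show groupGo (l :: ls) cur = groupGo ls (cur ++ [l]) by simp [groupGo, hh]]
      rw [ih (cur ++ [l]), keep_append cur l hr]
      rcases Bool.eq_false_or_eq_true (pvKeep cur) with hk | hk <;>
        simp [procA, hr, hh, hk]

-- ===== VERDICT (by name: the statement is the Claim_ definition above) =====
theorem remove_references_section_spec : Claim_equal_remove_references_section := by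
  intro content _
  unfold Spec_remove_references_section remove_references_section remove_references_section_alt
  by_cases hc : content = ""
  · subst hc; decide
  · simp only [if_neg hc]
    rw [foldA _ [] false, foldB (pvSplitLines content) [] []]
    rw [show ((([] : List (List String)) ++ groupGo (pvSplitLines content) []).filter pvKeep).flatten
        = flatKept (groupGo (pvSplitLines content) []) by simp [flatKept]]
    rw [main_lemma]
    simp [pvKeep]
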